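-- pv_equiv track=rewrite | github.com/pypi-data/pypi-mirror-206 | packages/agent-link/agent_link-0.1.2-py3-none-any.whl/agent_link/agent_link/core/lib/lib_scanner/scan.py | parse_libraries
-- ===== SOURCE A (Python) =====
-- def parse_libraries(response):
--     libraries = {}
--     for line in response.splitlines():
--         parts = line.split("==")
--         if len(parts) == 2:
--             lib, version = parts
--             if lib not in libraries or version > libraries[lib]:
--                 libraries[lib] = version
--     return libraries
-- ===== SOURCE B (Python) =====
-- def parse_libraries(response):
--     groups = {}
--     for line in response.splitlines():
--         parts = line.split("==")
--         if len(parts) == 2: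
--             lib, version = parts
--             groups.setdefault(lib, []).append(version)
--     return {lib: max(versions) for lib, versions in groups.items()}
-- ===== Notes on version B (the rewrite author's own statement) =====
-- stated objective: alternative
-- what changed: B collects all versions per library into a grouping dict in one pass and then reduces each group with max(), instead of A's running-maximum update inside the scan.
import Mathlib
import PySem

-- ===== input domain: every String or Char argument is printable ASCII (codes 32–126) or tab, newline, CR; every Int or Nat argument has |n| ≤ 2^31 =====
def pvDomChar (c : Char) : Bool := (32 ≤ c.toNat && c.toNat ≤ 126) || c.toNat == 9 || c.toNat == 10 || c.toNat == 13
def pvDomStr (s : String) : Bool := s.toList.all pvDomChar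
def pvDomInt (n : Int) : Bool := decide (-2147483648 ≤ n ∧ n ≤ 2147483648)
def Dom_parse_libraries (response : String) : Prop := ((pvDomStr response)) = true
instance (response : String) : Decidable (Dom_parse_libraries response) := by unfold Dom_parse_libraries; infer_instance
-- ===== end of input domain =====

-- B re-implements A by collecting all versions per library and then reducing each group with max();
-- equivalence of the return values is proved (neither program mutates its argument).

-- ===== PORT A =====
-- A: single scan keeping a running maximum version per library.
def parse_libraries (response : String) : List (String × String) :=
  ((PySem.Str.splitlines response).foldl
    (fun (libraries : PySem.Dict String String) line =>
      let parts := (PySem.Str.split? line "==").getD []   -- sep "==" ≠ "" so split? is always some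
      match parts with
      | [lib, version] =>        -- len(parts) == 2; lib, version = parts
        if !(libraries.contains lib) || decide (libraries.getD lib "" < version) then
          libraries.insert lib version
        else libraries
      | _ => libraries)
    PySem.Dict.empty).items

-- ===== PORT B =====
-- max(versions); every stored group is nonempty, so the "" default is never read
def pvMax (l : List String) : String := (PySem.List.max? l (fun v => v)).getD ""

def parse_libraries_alt (response : String) : List (String × String) :=
  let groups := (PySem.Str.splitlines response).foldl
    (fun (g : PySem.Dict String (List String)) line =>
      match (PySem.Str.split? line "==").getD [] with
      | [] => g
      | _ :: [] => g
      | lib :: version :: [] => g.modify lib [] (· ++ [version])   -- groups.setdefault(lib, []).append(version)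
      | _ :: _ :: _ :: _ => g)
    PySem.Dict.empty
  groups.items.map (fun p => (p.1, pvMax p.2))

-- ===== PRECONDITION & SPEC =====
def Spec_parse_libraries (response : String) (out : List (String × String)) : Prop := out = parse_libraries_alt response
instance (response : String) (out : List (String × String)) : Decidable (Spec_parse_libraries response out) := by unfold Spec_parse_libraries; infer_instance

-- ===== CLAIM (what is proved, stated in full; the proofs are below) =====
def Claim_equal_parse_libraries : Prop := ∀ (response : String), Dom_parse_libraries response → Spec_parse_libraries response (parse_libraries response)

-- ===== LEMMAS AND PROOFS =====

-- map a group to its (key, max version) item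
def pvF (p : String × List String) : String × String := (p.1, pvMax p.2)

-- the mapped dict: B's groups dict seen through A's eyes
def pvM (g : PySem.Dict String (List String)) : PySem.Dict String String :=
  PySem.Dict.mk (g.items.map pvF)

-- list-level forms of the Dict operations the two loop bodies perform
def pvIns {β : Type} (l : List (String × β)) (k : String) (v : β) : List (String × β) :=
  if l.any (fun p => p.1 == k) then l.map (fun p => if p.1 == k then (k, v) else p) else l ++ [(k, v)]

def pvGetD {β : Type} (l : List (String × β)) (k : String) (d : β) : β :=
  ((l.find? (fun p => p.1 == k)).map (fun p => p.2)).getD d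

def pvAstepL (l : List (String × String)) (k v : String) : List (String × String) :=
  if !(l.any (fun p => p.1 == k)) || decide (pvGetD l k "" < v) then pvIns l k v else l

def pvBstepL (l : List (String × List String)) (k v : String) : List (String × List String) :=
  pvIns l k (pvGetD l k [] ++ [v])

-- the step functions of the two folds
def pvAstep (libraries : PySem.Dict String String) (line : String) : PySem.Dict String String :=
  match (PySem.Str.split? line "==").getD [] with
  | [lib, version] =>
    if !(libraries.contains lib) || decide (libraries.getD lib "" < version) then
      libraries.insert lib version
    else libraries
  | _ => libraries

def pvBstep (g : PySem.Dict String (List String)) (line : String) : PySem.Dict String (List String) :=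
  match (PySem.Str.split? line "==").getD [] with
  | [] => g
  | _ :: [] => g
  | lib :: version :: [] => g.modify lib [] (· ++ [version])
  | _ :: _ :: _ :: _ => g

lemma toList_nil_eq_empty (v : String) (h : v.toList = []) : v = "" := by
  have := congrArg String.ofList h
  simpa using this

lemma empty_lt_of_ne (v : String) (h : v ≠ "") : "" < v := by
  rw [String.lt_iff_toList_lt]
  cases hv : v.toList with
  | nil => exact absurd (toList_nil_eq_empty v hv) h
  | cons c cs => exact List.nil_lt_cons c cs

lemma pvMax_singleton (v : String) : pvMax [v] = v := rfl

lemma pvMax_cons (x : String) (t : List String) : pvMax (x :: t) = t.foldl max x := by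
  unfold pvMax
  rw [PySem.List.max?_id_cons]
  rfl

lemma pvMax_append (L : List String) (v : String) :
    pvMax (L ++ [v]) = if pvMax L < v then v else pvMax L := by
  cases L with
  | nil =>
    show v = if ("" : String) < v then v else ""
    rcases eq_or_ne v "" with rfl | hv
    · rw [if_neg (lt_irrefl "")]
    · rw [if_pos (empty_lt_of_ne v hv)]
  | cons x t =>
    rw [List.cons_append, pvMax_cons, pvMax_cons, List.foldl_append]
    show max (List.foldl max x t) v
      = if List.foldl max x t < v then v else List.foldl max x t
    rcases lt_or_ge (List.foldl max x t) v with h | h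
    · rw [if_pos h]; exact max_eq_right h.le
    · rw [if_neg (not_lt.mpr h)]; exact max_eq_left h

-- skipping a head whose key does not match
lemma pvIns_cons {β : Type} (p : String × β) (l : List (String × β)) (k : String) (v : β)
    (h : (p.1 == k) = false) : pvIns (p :: l) k v = p :: pvIns l k v := by
  unfold pvIns
  rw [List.any_cons, h, Bool.false_or]
  split_ifs with hc
  · rw [List.map_cons, if_neg (by simp [h])]
  · rfl

lemma pvGetD_cons {β : Type} (p : String × β) (l : List (String × β)) (k : String) (d : β)
    (h : (p.1 == k) = false) : pvGetD (p :: l) k d = pvGetD l k d := by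
  unfold pvGetD
  rw [List.find?_cons_of_neg]
  simp [h]

lemma pvAstepL_cons (p : String × String) (l : List (String × String)) (k v : String)
    (h : (p.1 == k) = false) : pvAstepL (p :: l) k v = p :: pvAstepL l k v := by
  unfold pvAstepL
  rw [pvGetD_cons p l k "" h]
  simp only [List.any_cons, h, Bool.false_or]
  split_ifs with hc
  · exact pvIns_cons p l k v h
  · rfl

lemma pvBstepL_cons (p : String × List String) (l : List (String × List String)) (k v : String)
    (h : (p.1 == k) = false) : pvBstepL (p :: l) k v = p :: pvBstepL l k v := by
  unfold pvBstepL
  rw [pvGetD_cons p l k [] h]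
  exact pvIns_cons p l k _ h

lemma map_ite_id {β : Type} (l : List (String × β)) (k : String) (v : β)
    (h : ∀ q ∈ l, (q.1 == k) = false) :
    l.map (fun p => if p.1 == k then (k, v) else p) = l := by
  induction l with
  | nil => rfl
  | cons p t ih =>
    rw [List.map_cons, if_neg (by simp [h p (List.mem_cons_self)]),
      ih (fun q hq => h q (List.mem_cons_of_mem _ hq))]

lemma pvGetD_cons_pos {β : Type} (p : String × β) (l : List (String × β)) (k : String) (d : β)
    (h : (p.1 == k) = true) : pvGetD (p :: l) k d = p.2 := by
  unfold pvGetD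
  rw [show List.find? (fun q => q.1 == k) (p :: l) = some p from List.find?_cons_of_pos h]
  rfl

lemma pvIns_cons_pos {β : Type} (p : String × β) (l : List (String × β)) (k : String) (v : β)
    (h : (p.1 == k) = true) (hnt : ∀ q ∈ l, (q.1 == k) = false) :
    pvIns (p :: l) k v = (k, v) :: l := by
  unfold pvIns
  rw [List.any_cons, h, Bool.true_or, if_pos rfl, List.map_cons, if_pos h, map_ite_id l k v hnt]

-- the heart: one [lib, version] update commutes with the per-item max
lemma keyL (l : List (String × List String)) (hnd : (l.map Prod.fst).Nodup) (k v : String) :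
    pvAstepL (l.map pvF) k v = (pvBstepL l k v).map pvF := by
  induction l with
  | nil =>
    simp [pvAstepL, pvBstepL, pvIns, pvGetD, pvF, pvMax_singleton]
  | cons p t ih =>
    rw [List.map_cons, List.nodup_cons] at hnd
    by_cases hk : p.1 = k
    · -- head is the (unique) match
      have hnt : ∀ q ∈ t, (q.1 == k) = false := by
        intro q hq
        have : q.1 ≠ p.1 := fun he => hnd.1 (he ▸ List.mem_map_of_mem hq)
        simp [hk ▸ this]
      have hntF : ∀ q ∈ t.map pvF, (q.1 == k) = false := by
        intro q hq
        rcases List.mem_map.mp hq with ⟨r, hr, he⟩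
        exact he ▸ hnt r hr
      have hbeq : (p.1 == k) = true := by simp [hk]
      have hFbeq : ((pvF p).1 == k) = true := hbeq
      have hanyF : ((pvF p :: t.map pvF).any (fun q => q.1 == k)) = true := by
        rw [List.any_cons, hFbeq, Bool.true_or]
      unfold pvAstepL pvBstepL
      rw [List.map_cons, hanyF, pvGetD_cons_pos (pvF p) (t.map pvF) k "" hFbeq,
        pvIns_cons_pos (pvF p) (t.map pvF) k v hFbeq hntF,
        pvGetD_cons_pos p t k [] hbeq, pvIns_cons_pos p t k (p.2 ++ [v]) hbeq hnt,
        List.map_cons]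
      simp only [Bool.not_true, Bool.false_or, decide_eq_true_eq, pvF]
      rw [pvMax_append p.2 v]
      split_ifs with hlt
      · rfl
      · simp [hk]
    · -- head does not match: both steps skip it
      have hb : (p.1 == k) = false := by simp [hk]
      have hbF : ((pvF p).1 == k) = false := hb
      rw [List.map_cons, pvAstepL_cons _ _ _ _ hbF, pvBstepL_cons _ _ _ _ hb,
        List.map_cons, ih hnd.2]

lemma keys_pvBstepL (l : List (String × List String)) (k v : String)
    (hnd : (l.map Prod.fst).Nodup) : ((pvBstepL l k v).map Prod.fst).Nodup := by
  unfold pvBstepL pvIns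
  split_ifs with hc
  · have : (l.map (fun p => if p.1 == k then (k, pvGetD l k [] ++ [v]) else p)).map Prod.fst
        = l.map Prod.fst := by
      rw [List.map_map]
      apply List.map_congr_left
      intro q _
      by_cases h : q.1 = k <;> simp [h]
    rw [this]; exact hnd
  · have hcf : l.any (fun p => p.1 == k) = false := by
      simp only [Bool.not_eq_true] at hc
      exact hc
    have hk : k ∉ l.map Prod.fst := by
      intro hm
      rcases List.mem_map.mp hm with ⟨q, hq, he⟩
      have := List.any_eq_false.mp hcf q hq
      exact this (by simp [he])
    rw [List.map_append]
    refine List.Nodup.append hnd (by simp) ?_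
    intro x hx hxk
    have : x = k := by simpa using hxk
    exact hk (this ▸ hx)

-- Dict-level steps are the list-level steps on the item lists
lemma dictA_eq (d : PySem.Dict String String) (k v : String) :
    (if !(d.contains k) || decide (d.getD k "" < v) then d.insert k v else d)
      = PySem.Dict.mk (pvAstepL d.items k v) := by
  unfold pvAstepL pvIns pvGetD PySem.Dict.insert PySem.Dict.contains PySem.Dict.getD PySem.Dict.get?
  split_ifs <;> rfl

lemma dictB_eq (d : PySem.Dict String (List String)) (k v : String) :
    d.modify k [] (· ++ [v]) = PySem.Dict.mk (pvBstepL d.items k v) := by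
  unfold pvBstepL pvIns pvGetD PySem.Dict.modify PySem.Dict.insert PySem.Dict.contains
    PySem.Dict.getD PySem.Dict.get?
  split_ifs <;> rfl

lemma step_comm (g : PySem.Dict String (List String)) (line : String)
    (hnd : (g.items.map Prod.fst).Nodup) :
    pvAstep (pvM g) line = pvM (pvBstep g line) := by
  unfold pvAstep pvBstep
  cases hparts : (PySem.Str.split? line "==").getD [] with
  | nil => rfl
  | cons a t =>
    cases t with
    | nil => rfl
    | cons b t2 =>
      cases t2 with
      | cons c t3 => rfl
      | nil =>
        simp only []
        rw [dictA_eq (pvM g) a b, dictB_eq g a b]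
        show PySem.Dict.mk (pvAstepL (g.items.map pvF) a b) = _
        rw [keyL g.items hnd a b]
        rfl

lemma nodup_pvBstep (g : PySem.Dict String (List String)) (line : String)
    (hnd : (g.items.map Prod.fst).Nodup) :
    ((pvBstep g line).items.map Prod.fst).Nodup := by
  unfold pvBstep
  cases hparts : (PySem.Str.split? line "==").getD [] with
  | nil => exact hnd
  | cons a t =>
    cases t with
    | nil => exact hnd
    | cons b t2 =>
      cases t2 with
      | cons c t3 => exact hnd
      | nil =>
        simp only []
        rw [dictB_eq g a b]
        exact keys_pvBstepL g.items a b hnd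

lemma loop_comm (lines : List String) :
    ∀ (g : PySem.Dict String (List String)), (g.items.map Prod.fst).Nodup →
      lines.foldl pvAstep (pvM g) = pvM (lines.foldl pvBstep g) := by
  induction lines with
  | nil => intro g _; rfl
  | cons line rest ih =>
    intro g hnd
    simp only [List.foldl_cons]
    rw [step_comm g line hnd]
    exact ih _ (nodup_pvBstep g line hnd)

-- ===== VERDICT (by name: the statement is the Claim_ definition above) =====
theorem parse_libraries_spec : Claim_equal_parse_libraries := by
  intro response _
  show parse_libraries response = parse_libraries_alt response
  unfold parse_libraries parse_libraries_alt
  have := loop_comm (PySem.Str.splitlines response) PySem.Dict.empty List.nodup_nil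
  have hA : (PySem.Str.splitlines response).foldl
      (fun (libraries : PySem.Dict String String) line =>
        let parts := (PySem.Str.split? line "==").getD []
        match parts with
        | [lib, version] =>
          if !(libraries.contains lib) || decide (libraries.getD lib "" < version) then
            libraries.insert lib version
          else libraries
        | _ => libraries) PySem.Dict.empty
      = (PySem.Str.splitlines response).foldl pvAstep (pvM PySem.Dict.empty) := rfl
  rw [hA, this]
  rfl
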